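-- pv_equiv track=rewrite | github.com/OLC-LOC-Bioinformatics/COWSNPhR | cowsnphr_src/tree_methods.py | find_identical_calls
-- ===== SOURCE A (Python) =====
-- def find_identical_calls(group_strain_snp_sequence):
--     """
--     Remove any positions that have all identical SNP calls
--     :param group_strain_snp_sequence: type DICT: Dictionary of species: group: strain name: reference chromosome:
--     position: sequence
--     :return: ident_group_positions: Dictionary of species: group: reference chromosome: set of identical positions
--     """
--     # Initialise dictionary to store the number of strains with a particular base for positions of interest
--     snp_count_dict = dict()
--     # Dictionary to store the number of strains present in each grouping
--     species_group_strain_dict = dict()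
--     # Dictionary to store the identical SNP positions
--     ident_group_positions = dict()
--     for species, group_dict in group_strain_snp_sequence.items():
--         snp_count_dict[species] = dict()
--         species_group_strain_dict[species] = dict()
--         for group, strain_dict in group_dict.items():
--             snp_count_dict[species][group] = dict()
--             # Count the number of strains in the dictionary - if the sequence is the same for all of them, it
--             # will be excluded
--             species_group_strain_dict[species][group] = len(strain_dict)
--             for strain_name, ref_dict in strain_dict.items():
--                 # Iterate through all the reference chromosomes
--                 for ref_chrom, pos_dict in ref_dict.items():
--                     if ref_chrom not in snp_count_dict[species][group]:
--                         snp_count_dict[species][group][ref_chrom] = dict()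
--                     for pos, seq in pos_dict.items():
--                         if pos not in snp_count_dict[species][group][ref_chrom]:
--                             snp_count_dict[species][group][ref_chrom][pos] = dict()
--                         # If the base at this position hasn't been encountered, set the count to 1
--                         if seq not in snp_count_dict[species][group][ref_chrom][pos]:
--                             snp_count_dict[species][group][ref_chrom][pos][seq] = 1
--                         # Otherwise, increment the count of this sequence
--                         else:
--                             snp_count_dict[species][group][ref_chrom][pos][seq] += 1
--     # Find all the positions that are not all the same
--     for species, group_dict in snp_count_dict.items():
--         # Initialise the species key
--         ident_group_positions[species] = dict()
--         for group, ref_dict in group_dict.items():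
--             # Initialise the group key
--             ident_group_positions[species][group] = dict()
--             for ref_chrom, pos_dict in ref_dict.items():
--                 # Initialise the reference chromosome key as required
--                 if ref_chrom not in ident_group_positions[species][group]:
--                     ident_group_positions[species][group][ref_chrom] = set()
--                 for pos, seq_dict in pos_dict.items():
--                     for current_seq, count in seq_dict.items():
--                         # If the count is equal than the number of strains, add the position to the set
--                         # of identical positions
--                         if count >= species_group_strain_dict[species][group]:
--                             ident_group_positions[species][group][ref_chrom].add(pos)
--     return ident_group_positions
-- ===== SOURCE B (Python) =====
-- def find_identical_calls(group_strain_snp_sequence):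
--     """
--     One-pass re-implementation: per (species, group, chromosome, position) keep only
--     (first base seen, all-bases-identical flag, number of entries) instead of a full
--     base->count dictionary, then keep positions whose bases are all identical and
--     which are present in every strain of the group.
--     """
--     return {species: {group: _group_identical(strain_dict)
--                       for group, strain_dict in group_dict.items()}
--             for species, group_dict in group_strain_snp_sequence.items()}
--
--
-- def _group_identical(strain_dict):
--     strain_count = len(strain_dict)
--     # summary: ref_chrom -> pos -> [first_base, all_same, entry_count]
--     summary = {}
--     for ref_dict in strain_dict.values():
--         for ref_chrom, pos_dict in ref_dict.items():
--             chrom_summary = summary.setdefault(ref_chrom, {})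
--             for pos, seq in pos_dict.items():
--                 entry = chrom_summary.get(pos)
--                 if entry is None:
--                     chrom_summary[pos] = [seq, True, 1]
--                 else:
--                     entry[1] = entry[1] and seq == entry[0]
--                     entry[2] += 1
--     return {ref_chrom: {pos for pos, (_, same, cnt) in chrom_summary.items()
--                         if same and cnt == strain_count}
--             for ref_chrom, chrom_summary in summary.items()}
-- ===== Notes on version B (the rewrite author's own statement) =====
-- stated objective: simpler
-- what changed: A makes two phases with a per-position dictionary of base->count plus a separate species/group strain-count dictionary looked up later; B is a single pass that keeps only (first base, all-same flag, entry count) per position and emits a position when the flag holds and the count equals the group's strain count.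
import Mathlib
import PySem

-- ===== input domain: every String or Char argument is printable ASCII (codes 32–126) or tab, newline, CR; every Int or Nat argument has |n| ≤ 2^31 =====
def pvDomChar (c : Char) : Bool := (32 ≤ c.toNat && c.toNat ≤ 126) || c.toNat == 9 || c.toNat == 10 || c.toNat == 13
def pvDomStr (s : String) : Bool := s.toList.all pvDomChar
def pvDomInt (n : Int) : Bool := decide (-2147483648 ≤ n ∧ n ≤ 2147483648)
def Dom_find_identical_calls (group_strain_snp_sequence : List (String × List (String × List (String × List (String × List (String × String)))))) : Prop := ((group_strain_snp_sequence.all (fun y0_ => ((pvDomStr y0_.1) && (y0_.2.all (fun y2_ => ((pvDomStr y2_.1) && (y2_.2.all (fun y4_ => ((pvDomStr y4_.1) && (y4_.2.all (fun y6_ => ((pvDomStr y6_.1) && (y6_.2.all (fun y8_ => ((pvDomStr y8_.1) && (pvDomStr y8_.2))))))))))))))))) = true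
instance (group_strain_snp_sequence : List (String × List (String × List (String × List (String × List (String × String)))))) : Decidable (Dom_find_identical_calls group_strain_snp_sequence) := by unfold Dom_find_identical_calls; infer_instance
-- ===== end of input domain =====

-- B replaces A's two-phase count (per-position dictionaries of base→count, then a filtering
-- pass with a strain-count lookup) by a single pass keeping only (first base, all-same flag,
-- entry count) per position — objective: simpler. Equality proved on association lists with
-- unique keys at every level (the lists that encode A's Python dicts).

-- ===== PORT A =====
-- innermost 'if seq not in …: = 1 else: += 1'
def pvA_seq (sd : PySem.Dict String Int) (seq : String) : PySem.Dict String Int :=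
  if sd.contains seq = false then sd.insert seq 1 else sd.modify seq 0 (· + 1)

-- body of 'for pos, seq in pos_dict.items()'
def pvA_pos (pd : PySem.Dict String (PySem.Dict String Int)) (pos seq : String) :
    PySem.Dict String (PySem.Dict String Int) :=
  let pd := if pd.contains pos = false then pd.insert pos PySem.Dict.empty else pd
  pd.modify pos PySem.Dict.empty (fun sd => pvA_seq sd seq)

-- body of 'for ref_chrom, pos_dict in ref_dict.items()'
def pvA_chrom (cd : PySem.Dict String (PySem.Dict String (PySem.Dict String Int)))
    (rc : String × List (String × String)) :
    PySem.Dict String (PySem.Dict String (PySem.Dict String Int)) :=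
  let cd := if cd.contains rc.1 = false then cd.insert rc.1 PySem.Dict.empty else cd
  rc.2.foldl (fun cd ps => cd.modify rc.1 PySem.Dict.empty (fun pd => pvA_pos pd ps.1 ps.2)) cd

-- 'for strain_name, ref_dict in strain_dict.items()' (the per-group part of phase 1)
def pvA_group (strains : List (String × List (String × List (String × String)))) :
    PySem.Dict String (PySem.Dict String (PySem.Dict String Int)) :=
  strains.foldl (fun cd st => st.2.foldl pvA_chrom cd) PySem.Dict.empty

-- 'for current_seq, count in seq_dict.items(): if count >= …: add(pos)'
def pvA_addPos (n : Int) (s : PySem.Set String) (pos : String) (sd : PySem.Dict String Int) :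
    PySem.Set String :=
  sd.items.foldl (fun s kc => if n ≤ kc.2 then PySem.Set.add s pos else s) s

-- phase 2, per group: 'for ref_chrom, pos_dict in ref_dict.items(): …'
def pvA_identGroup (n : Int) (cd : PySem.Dict String (PySem.Dict String (PySem.Dict String Int))) :
    PySem.Dict String (PySem.Set String) :=
  cd.items.foldl (fun out cp =>
    let out := if out.contains cp.1 = false then out.insert cp.1 PySem.Set.empty else out
    out.modify cp.1 PySem.Set.empty
      (fun s => cp.2.items.foldl (fun s pe => pvA_addPos n s pe.1 pe.2) s)) PySem.Dict.empty

def find_identical_calls (group_strain_snp_sequence : List (String × List (String × List (String × List (String × List (String × String)))))) : List (String × List (String × List (String × List String))) :=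
  -- phase 1: build snp_count_dict and species_group_strain_dict in one loop
  let dicts := group_strain_snp_sequence.foldl
    (fun (st : PySem.Dict String (PySem.Dict String (PySem.Dict String (PySem.Dict String (PySem.Dict String Int)))) ×
              PySem.Dict String (PySem.Dict String Int)) sp =>
      let inner := sp.2.foldl
        (fun (p : PySem.Dict String (PySem.Dict String (PySem.Dict String (PySem.Dict String Int))) ×
                  PySem.Dict String Int) gr =>
          (p.1.insert gr.1 (pvA_group gr.2), p.2.insert gr.1 (gr.2.length : Int)))
        (PySem.Dict.empty, PySem.Dict.empty)
      (st.1.insert sp.1 inner.1, st.2.insert sp.1 inner.2))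
    (PySem.Dict.empty, PySem.Dict.empty)
  let snp_count_dict := dicts.1
  let species_group_strain_dict := dicts.2
  -- phase 2: find the identical positions
  let ident := snp_count_dict.items.foldl
    (fun out spe =>
      out.insert spe.1 (spe.2.items.foldl
        (fun out2 ge =>
          out2.insert ge.1 (pvA_identGroup
            ((species_group_strain_dict.getD spe.1 PySem.Dict.empty).getD ge.1 0) ge.2))
        PySem.Dict.empty))
    PySem.Dict.empty
  ident.items.map (fun spe => (spe.1, spe.2.items.map (fun ge => (ge.1, ge.2.items))))

-- ===== PORT B =====
-- per-position update: keep (first base, all bases identical so far, entry count)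
def pvB_pos (pd : PySem.Dict String (String × Bool × Int)) (pos seq : String) :
    PySem.Dict String (String × Bool × Int) :=
  match pd.get? pos with
  | none => pd.insert pos (seq, true, 1)
  | some e => pd.insert pos (e.1, e.2.1 && (seq == e.1), e.2.2 + 1)

-- the single pass of _group_identical over strain_dict.values()
def pvB_summary (strains : List (String × List (String × List (String × String)))) :
    PySem.Dict String (PySem.Dict String (String × Bool × Int)) :=
  strains.foldl (fun sm st =>
    st.2.foldl (fun sm rc =>
      sm.insert rc.1 (rc.2.foldl (fun pd ps => pvB_pos pd ps.1 ps.2) (sm.getD rc.1 PySem.Dict.empty))) sm)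
    PySem.Dict.empty

-- _group_identical: summary pass, then the comprehension keeping same ∧ cnt = strain_count
def pvB_groupIdent (strains : List (String × List (String × List (String × String)))) :
    List (String × List String) :=
  let n : Int := strains.length
  (pvB_summary strains).items.map (fun ce =>
    (ce.1, (ce.2.items.filter (fun pe => pe.2.2.1 && (pe.2.2.2 == n))).map (·.1)))

def find_identical_calls_alt (group_strain_snp_sequence : List (String × List (String × List (String × List (String × List (String × String)))))) : List (String × List (String × List (String × List String))) :=
  group_strain_snp_sequence.map (fun sp => (sp.1, sp.2.map (fun gr => (gr.1, pvB_groupIdent gr.2))))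

-- ===== PRECONDITION & SPEC =====
-- Pre_ admits exactly the association lists that encode A's Python input (a dict of dicts …):
-- the keys at every one of the five dictionary levels are pairwise distinct. Duplicate keys are
-- unrepresentable as a Python dict, so nothing A runs on is excluded.
def Pre_find_identical_calls (group_strain_snp_sequence : List (String × List (String × List (String × List (String × List (String × String)))))) : Prop :=
  (group_strain_snp_sequence.map (·.1)).Nodup ∧
  ∀ sp ∈ group_strain_snp_sequence, (sp.2.map (·.1)).Nodup ∧
    ∀ gr ∈ sp.2, (gr.2.map (·.1)).Nodup ∧
      ∀ st ∈ gr.2, (st.2.map (·.1)).Nodup ∧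
        ∀ rc ∈ st.2, (rc.2.map (·.1)).Nodup
instance (group_strain_snp_sequence : List (String × List (String × List (String × List (String × List (String × String)))))) : Decidable (Pre_find_identical_calls group_strain_snp_sequence) := by unfold Pre_find_identical_calls; infer_instance

def pvWitness_find_identical_calls : (List (String × List (String × List (String × List (String × List (String × String)))))) :=
  [("Mycobacterium", [("group1",
      [("strainA", [("chr1", [("10", "A"), ("20", "C")])]),
       ("strainB", [("chr1", [("10", "A"), ("20", "G")])])])])]

def Spec_find_identical_calls (group_strain_snp_sequence : List (String × List (String × List (String × List (String × List (String × String)))))) (out : List (String × List (String × List (String × List String)))) : Prop := out = find_identical_calls_alt group_strain_snp_sequence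
instance (group_strain_snp_sequence : List (String × List (String × List (String × List (String × List (String × String)))))) (out : List (String × List (String × List (String × List String)))) : Decidable (Spec_find_identical_calls group_strain_snp_sequence out) := by unfold Spec_find_identical_calls; infer_instance

-- ===== CLAIM (what is proved, stated in full; the proofs are below) =====
def Claim_equal_find_identical_calls : Prop := ∀ (group_strain_snp_sequence : List (String × List (String × List (String × List (String × List (String × String)))))), Dom_find_identical_calls group_strain_snp_sequence → Pre_find_identical_calls group_strain_snp_sequence → Spec_find_identical_calls group_strain_snp_sequence (find_identical_calls group_strain_snp_sequence)


-- ===== LEMMAS AND PROOFS =====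

-- abbreviations used only by the proofs
def pvSeqs (p : String) (L : List (String × String)) : List String :=
  (L.filter (fun e => e.1 == p)).map (·.2)

def pvFoldA (L : List (String × String)) (pd : PySem.Dict String (PySem.Dict String Int)) :
    PySem.Dict String (PySem.Dict String Int) :=
  L.foldl (fun pd ps => pvA_pos pd ps.1 ps.2) pd

def pvFoldB (L : List (String × String)) (pd : PySem.Dict String (String × Bool × Int)) :
    PySem.Dict String (String × Bool × Int) :=
  L.foldl (fun pd ps => pvB_pos pd ps.1 ps.2) pd

def pvE (c : String) (strains : List (String × List (String × List (String × String)))) :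
    List (String × String) :=
  strains.flatMap (fun st => st.2.flatMap (fun rc => if rc.1 = c then rc.2 else []))

def pvTriple (s : List String) : String × Bool × Int :=
  (s.headI, (s.drop 1).all (· == s.headI), (s.length : Int))

-- PySem.Dict.modify is exactly Python's d[k] = f(d.get(k, d0)) (definitional)
theorem pvModify_eq {ν : Type} (d : PySem.Dict String ν) (k : String) (d0 : ν) (f : ν → ν) :
    d.modify k d0 f = d.insert k (f (d.getD k d0)) := rfl

theorem pvSet_add_mem {s : PySem.Set String} {x : String} (h : x ∈ s) :
    PySem.Set.add s x = s := by simp [PySem.Set.add, h]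

theorem pvSet_add_not_mem {s : PySem.Set String} {x : String} (h : x ∉ s) :
    PySem.Set.add s x = s ++ [x] := by simp [PySem.Set.add, h]

theorem pvMem_add_self (s : PySem.Set String) (x : String) : x ∈ PySem.Set.add s x :=
  (PySem.Set.mem_add s x x).mpr (Or.inr rfl)

theorem pvInsert_keys {ν : Type} (d : PySem.Dict String ν) (k : String) (v : ν) :
    (d.insert k v).keys = PySem.Set.add d.keys k := by
  by_cases h : d.contains k = true
  · rw [PySem.Dict.keys_insert_of_contains _ _ h,
      pvSet_add_mem ((PySem.Dict.contains_iff_mem_keys _ _).mp h)]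
  · have h2 : d.contains k = false := by simpa using h
    rw [PySem.Dict.keys_insert_of_not_contains _ _ h2,
      pvSet_add_not_mem (fun hm => by simp [(PySem.Dict.contains_iff_mem_keys _ _).mpr hm] at h2)]

theorem pvUpdate_const {β : Type} {s : PySem.Set String} {x : String} (h : x ∈ s) (l : List β) :
    PySem.Set.update s (l.map (fun _ => x)) = s := by
  induction l with
  | nil => simp [PySem.Set.update_nil]
  | cons b t ih => rw [List.map_cons, PySem.Set.update_cons, pvSet_add_mem h]; exact ih

theorem pvSeqs_append (p : String) (L : List (String × String)) (e : String × String) :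
    pvSeqs p (L ++ [e]) = pvSeqs p L ++ (if e.1 = p then [e.2] else []) := by
  by_cases h : e.1 = p <;> simp [pvSeqs, List.filter_append, h]

theorem pvA_seq_counter (s : List String) (v : String) :
    pvA_seq (PySem.Dict.counter s) v = PySem.Dict.counter (s ++ [v]) := by
  rw [PySem.Dict.counter_append_singleton, pvModify_eq]
  unfold pvA_seq
  by_cases h : (PySem.Dict.counter s).contains v
  · simp [h, pvModify_eq]
  · rw [if_pos (by simp [h]), PySem.Dict.getD_of_not_contains _ _ (by simp [h])]
    norm_num

theorem pvA_pos_get_self (pd : PySem.Dict String (PySem.Dict String Int)) (q v : String) :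
    (pvA_pos pd q v).get? q = some (pvA_seq ((pd.get? q).getD PySem.Dict.empty) v) := by
  unfold pvA_pos
  by_cases h : pd.contains q = false
  · rw [if_pos (by rw [h]), pvModify_eq, PySem.Dict.get?_insert_self, PySem.Dict.getD_insert_self,
      (PySem.Dict.get?_eq_none_iff_contains pd q).mpr h]
    rfl
  · rw [if_neg h, pvModify_eq, PySem.Dict.get?_insert_self, PySem.Dict.getD_eq_get?_getD]

theorem pvA_pos_get_ne (pd : PySem.Dict String (PySem.Dict String Int)) (q v p : String)
    (h : p ≠ q) : (pvA_pos pd q v).get? p = pd.get? p := by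
  unfold pvA_pos
  by_cases h2 : pd.contains q = false
  · rw [if_pos (by rw [h2]), pvModify_eq, PySem.Dict.get?_insert_of_ne _ _ h,
      PySem.Dict.get?_insert_of_ne _ _ h]
  · rw [if_neg h2, pvModify_eq, PySem.Dict.get?_insert_of_ne _ _ h]

theorem pvB_pos_get_self (pd : PySem.Dict String (String × Bool × Int)) (q v : String) :
    (pvB_pos pd q v).get? q = some (match pd.get? q with
      | none => (v, true, 1)
      | some e => (e.1, e.2.1 && (v == e.1), e.2.2 + 1)) := by
  unfold pvB_pos
  cases pd.get? q <;> simp [PySem.Dict.get?_insert_self]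

theorem pvB_pos_get_ne (pd : PySem.Dict String (String × Bool × Int)) (q v p : String)
    (h : p ≠ q) : (pvB_pos pd q v).get? p = pd.get? p := by
  unfold pvB_pos
  cases pd.get? q <;> simp only [] <;> rw [PySem.Dict.get?_insert_of_ne _ _ h]

theorem pvFoldA_get? (L : List (String × String)) (p : String) :
    (pvFoldA L PySem.Dict.empty).get? p =
      if pvSeqs p L = [] then none else some (PySem.Dict.counter (pvSeqs p L)) := by
  induction L using List.reverseRecOn with
  | nil => simp [pvFoldA, pvSeqs, PySem.Dict.get?_empty]
  | append_singleton L e ih =>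
    rw [pvSeqs_append]
    unfold pvFoldA at ih ⊢
    rw [List.foldl_append, List.foldl_cons, List.foldl_nil]
    by_cases hpe : e.1 = p
    · subst hpe
      rw [if_pos rfl, pvA_pos_get_self, ih]
      by_cases hs : pvSeqs e.1 L = []
      · rw [if_pos hs, hs, if_neg (by simp)]
        rfl
      · rw [if_neg hs, if_neg (by simp), Option.getD_some, pvA_seq_counter]
    · rw [if_neg hpe, pvA_pos_get_ne _ _ _ _ (fun h => hpe h.symm), ih, List.append_nil]

theorem pvTriple_append (s : List String) (v : String) (h : s ≠ []) :
    pvTriple (s ++ [v]) =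
      ((pvTriple s).1, (pvTriple s).2.1 && (v == (pvTriple s).1), (pvTriple s).2.2 + 1) := by
  obtain ⟨a, t, rfl⟩ := List.exists_cons_of_ne_nil h
  simp [pvTriple, List.all_append]

theorem pvFoldB_get? (L : List (String × String)) (p : String) :
    (pvFoldB L PySem.Dict.empty).get? p =
      if pvSeqs p L = [] then none else some (pvTriple (pvSeqs p L)) := by
  induction L using List.reverseRecOn with
  | nil => simp [pvFoldB, pvSeqs, PySem.Dict.get?_empty]
  | append_singleton L e ih =>
    rw [pvSeqs_append]
    unfold pvFoldB at ih ⊢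
    rw [List.foldl_append, List.foldl_cons, List.foldl_nil]
    by_cases hpe : e.1 = p
    · subst hpe
      rw [if_pos rfl, pvB_pos_get_self, ih]
      by_cases hs : pvSeqs e.1 L = []
      · rw [if_pos hs, hs, if_neg (by simp)]
        rfl
      · rw [if_neg hs, if_neg (by simp)]
        rw [pvTriple_append _ _ hs]
    · rw [if_neg hpe, pvB_pos_get_ne _ _ _ _ (fun h => hpe h.symm), ih, List.append_nil]

theorem pvA_pos_keys (pd : PySem.Dict String (PySem.Dict String Int)) (q v : String) :
    (pvA_pos pd q v).keys = PySem.Set.add pd.keys q := by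
  unfold pvA_pos
  by_cases h : pd.contains q = false
  · rw [if_pos (by rw [h]), pvModify_eq, pvInsert_keys, pvInsert_keys,
      pvSet_add_mem (pvMem_add_self _ _)]
  · rw [if_neg h, pvModify_eq, pvInsert_keys]

theorem pvB_pos_keys (pd : PySem.Dict String (String × Bool × Int)) (q v : String) :
    (pvB_pos pd q v).keys = PySem.Set.add pd.keys q := by
  unfold pvB_pos
  cases pd.get? q <;> simp only [] <;> rw [pvInsert_keys]

theorem pvFoldA_keys (L : List (String × String)) (pd : PySem.Dict String (PySem.Dict String Int)) :
    (pvFoldA L pd).keys = PySem.Set.update pd.keys (L.map (·.1)) := by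
  induction L generalizing pd with
  | nil => simp [pvFoldA, PySem.Set.update_nil]
  | cons e L ih =>
    rw [List.map_cons, PySem.Set.update_cons, ← pvA_pos_keys pd e.1 e.2, ← ih]
    rfl

theorem pvFoldB_keys (L : List (String × String)) (pd : PySem.Dict String (String × Bool × Int)) :
    (pvFoldB L pd).keys = PySem.Set.update pd.keys (L.map (·.1)) := by
  induction L generalizing pd with
  | nil => simp [pvFoldB, PySem.Set.update_nil]
  | cons e L ih =>
    rw [List.map_cons, PySem.Set.update_cons, ← pvB_pos_keys pd e.1 e.2, ← ih]
    rfl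

theorem pvA_posFold_getD (posL : List (String × String)) (k : String)
    (cd : PySem.Dict String (PySem.Dict String (PySem.Dict String Int))) (c : String) :
    (posL.foldl (fun cd ps => cd.modify k PySem.Dict.empty (fun pd => pvA_pos pd ps.1 ps.2)) cd).getD c
        PySem.Dict.empty =
      if c = k then pvFoldA posL (cd.getD k PySem.Dict.empty) else cd.getD c PySem.Dict.empty := by
  induction posL generalizing cd with
  | nil => by_cases h : c = k <;> simp [pvFoldA, h]
  | cons ps t ih =>
    rw [List.foldl_cons, ih]
    by_cases h : c = k
    · subst h
      rw [if_pos rfl, if_pos rfl, PySem.Dict.getD_modify_self]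
      rfl
    · rw [if_neg h, if_neg h, pvModify_eq, PySem.Dict.getD_insert_of_ne _ _ _ h]

theorem pvA_chrom_getD (cd : PySem.Dict String (PySem.Dict String (PySem.Dict String Int)))
    (rc : String × List (String × String)) (c : String) :
    (pvA_chrom cd rc).getD c PySem.Dict.empty =
      if c = rc.1 then pvFoldA rc.2 (cd.getD c PySem.Dict.empty)
      else cd.getD c PySem.Dict.empty := by
  unfold pvA_chrom
  by_cases h : cd.contains rc.1 = false
  · rw [if_pos (by rw [h]), pvA_posFold_getD]
    by_cases hc : c = rc.1
    · subst hc
      rw [if_pos rfl, if_pos rfl, PySem.Dict.getD_insert_self,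
        PySem.Dict.getD_of_not_contains _ _ h]
    · rw [if_neg hc, if_neg hc, PySem.Dict.getD_insert_of_ne _ _ _ hc]
  · rw [if_neg h, pvA_posFold_getD]
    by_cases hc : c = rc.1
    · subst hc; rw [if_pos rfl]
    · rw [if_neg hc, if_neg hc]

theorem pvA_chrom_keys (cd : PySem.Dict String (PySem.Dict String (PySem.Dict String Int)))
    (rc : String × List (String × String)) :
    (pvA_chrom cd rc).keys = PySem.Set.add cd.keys rc.1 := by
  unfold pvA_chrom
  by_cases h : cd.contains rc.1 = false
  · rw [if_pos (by rw [h]),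
      PySem.Dict.keys_foldl_modify_key rc.2 (fun _ => rc.1) PySem.Dict.empty
        (fun _ ps => fun pd => pvA_pos pd ps.1 ps.2) (cd.insert rc.1 PySem.Dict.empty),
      pvInsert_keys, pvUpdate_const (pvMem_add_self _ _)]
  · rw [if_neg h,
      PySem.Dict.keys_foldl_modify_key rc.2 (fun _ => rc.1) PySem.Dict.empty
        (fun _ ps => fun pd => pvA_pos pd ps.1 ps.2) cd,
      pvUpdate_const ((PySem.Dict.contains_iff_mem_keys _ _).mp (by simpa using h)),
      pvSet_add_mem ((PySem.Dict.contains_iff_mem_keys _ _).mp (by simpa using h))]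

theorem pvA_refFold_getD (refL : List (String × List (String × String)))
    (cd : PySem.Dict String (PySem.Dict String (PySem.Dict String Int))) (c : String) :
    (refL.foldl pvA_chrom cd).getD c PySem.Dict.empty =
      pvFoldA (refL.flatMap (fun rc => if rc.1 = c then rc.2 else []))
        (cd.getD c PySem.Dict.empty) := by
  induction refL generalizing cd with
  | nil => simp [pvFoldA]
  | cons rc rt ihr =>
    rw [List.foldl_cons, ihr, List.flatMap_cons]
    unfold pvFoldA
    rw [List.foldl_append, pvA_chrom_getD]
    by_cases hc : c = rc.1
    · rw [if_pos hc, if_pos hc.symm]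
      rfl
    · rw [if_neg hc, if_neg (fun hh => hc hh.symm), List.foldl_nil]

theorem pvA_group_getD (strains : List (String × List (String × List (String × String))))
    (cd : PySem.Dict String (PySem.Dict String (PySem.Dict String Int))) (c : String) :
    (strains.foldl (fun cd st => st.2.foldl pvA_chrom cd) cd).getD c PySem.Dict.empty =
      pvFoldA (pvE c strains) (cd.getD c PySem.Dict.empty) := by
  induction strains generalizing cd with
  | nil => simp [pvE, pvFoldA]
  | cons st t ih =>
    rw [List.foldl_cons, ih, pvA_refFold_getD]
    unfold pvE pvFoldA
    rw [List.flatMap_cons, List.foldl_append]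

theorem pvA_group_keys (strains : List (String × List (String × List (String × String))))
    (cd : PySem.Dict String (PySem.Dict String (PySem.Dict String Int))) :
    (strains.foldl (fun cd st => st.2.foldl pvA_chrom cd) cd).keys =
      PySem.Set.update cd.keys (strains.flatMap (fun st => st.2.map (·.1))) := by
  induction strains generalizing cd with
  | nil => simp [PySem.Set.update_nil]
  | cons st t ih =>
    rw [List.foldl_cons, ih, List.flatMap_cons, PySem.Set.update_append]
    congr 1
    induction st.2 generalizing cd with
    | nil => simp [PySem.Set.update_nil]
    | cons rc rt ihr =>
      rw [List.foldl_cons, ihr, List.map_cons, PySem.Set.update_cons, pvA_chrom_keys]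

theorem pvB_refFold_getD (refL : List (String × List (String × String)))
    (sm : PySem.Dict String (PySem.Dict String (String × Bool × Int))) (c : String) :
    (refL.foldl (fun sm rc =>
        sm.insert rc.1 (rc.2.foldl (fun pd ps => pvB_pos pd ps.1 ps.2) (sm.getD rc.1 PySem.Dict.empty))) sm).getD c
        PySem.Dict.empty =
      pvFoldB (refL.flatMap (fun rc => if rc.1 = c then rc.2 else []))
        (sm.getD c PySem.Dict.empty) := by
  induction refL generalizing sm with
  | nil => simp [pvFoldB]
  | cons rc rt ihr =>
    rw [List.foldl_cons, ihr, List.flatMap_cons]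
    unfold pvFoldB
    rw [List.foldl_append]
    by_cases hc : c = rc.1
    · rw [if_pos hc.symm]
      subst hc
      rw [PySem.Dict.getD_insert_self]
    · rw [PySem.Dict.getD_insert_of_ne _ _ _ hc, if_neg (fun hh => hc hh.symm), List.foldl_nil]

theorem pvB_group_getD (strains : List (String × List (String × List (String × String))))
    (sm : PySem.Dict String (PySem.Dict String (String × Bool × Int))) (c : String) :
    (strains.foldl (fun sm st =>
        st.2.foldl (fun sm rc =>
          sm.insert rc.1 (rc.2.foldl (fun pd ps => pvB_pos pd ps.1 ps.2) (sm.getD rc.1 PySem.Dict.empty))) sm)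
      sm).getD c PySem.Dict.empty = pvFoldB (pvE c strains) (sm.getD c PySem.Dict.empty) := by
  induction strains generalizing sm with
  | nil => simp [pvE, pvFoldB]
  | cons st t ih =>
    rw [List.foldl_cons, ih, pvB_refFold_getD]
    unfold pvE pvFoldB
    rw [List.flatMap_cons, List.foldl_append]

theorem pvB_group_keys (strains : List (String × List (String × List (String × String))))
    (sm : PySem.Dict String (PySem.Dict String (String × Bool × Int))) :
    (strains.foldl (fun sm st =>
        st.2.foldl (fun sm rc =>
          sm.insert rc.1 (rc.2.foldl (fun pd ps => pvB_pos pd ps.1 ps.2) (sm.getD rc.1 PySem.Dict.empty))) sm)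
      sm).keys = PySem.Set.update sm.keys (strains.flatMap (fun st => st.2.map (·.1))) := by
  induction strains generalizing sm with
  | nil => simp [PySem.Set.update_nil]
  | cons st t ih =>
    rw [List.foldl_cons, ih, List.flatMap_cons, PySem.Set.update_append]
    congr 1
    induction st.2 generalizing sm with
    | nil => simp [PySem.Set.update_nil]
    | cons rc rt ihr =>
      rw [List.foldl_cons, ihr, List.map_cons, PySem.Set.update_cons, pvInsert_keys]

theorem pvIdentFold_items {α : Type} (G : String × α → PySem.Set String → PySem.Set String) :
    ∀ (l : List (String × α)) (out : PySem.Dict String (PySem.Set String)),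
      (∀ a ∈ l, out.contains a.1 = false) → (l.map (·.1)).Nodup →
      (l.foldl (fun out cp =>
        (if out.contains cp.1 = false then out.insert cp.1 PySem.Set.empty else out).modify cp.1
          PySem.Set.empty (G cp)) out).items =
        out.items ++ l.map (fun cp => (cp.1, G cp PySem.Set.empty)) := by
  intro l
  induction l with
  | nil => intro out _ _; simp
  | cons cp t ih =>
    intro out hf hnd
    rw [List.foldl_cons]
    have hc : out.contains cp.1 = false := hf cp (by simp)
    have hstep : (if out.contains cp.1 = false then out.insert cp.1 PySem.Set.empty else out).modify
        cp.1 PySem.Set.empty (G cp) = out.insert cp.1 (G cp PySem.Set.empty) := by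
      rw [if_pos (by rw [hc]), pvModify_eq, PySem.Dict.getD_insert_self,
        PySem.Dict.insert_insert_self]
    rw [List.map_cons, List.nodup_cons] at hnd
    rw [hstep, ih (out.insert cp.1 (G cp PySem.Set.empty))
        (fun a ha => by
          rw [PySem.Dict.contains_insert]
          have hne : (a.1 == cp.1) = false := by
            simp only [beq_eq_false_iff_ne, ne_eq]
            intro heq
            exact hnd.1 (heq ▸ List.mem_map_of_mem ha)
          rw [hne, Bool.false_or]
          exact hf a (by simp [ha]))
        hnd.2,
      PySem.Dict.items_insert_of_not_contains _ _ hc]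
    simp

theorem pvAddPos_any (n : Int) :
    ∀ (l : List (String × Int)) (s : PySem.Set String) (pos : String),
      l.foldl (fun s kc => if n ≤ kc.2 then PySem.Set.add s pos else s) s =
        if l.any (fun kc => decide (n ≤ kc.2)) then PySem.Set.add s pos else s := by
  intro l
  induction l with
  | nil => intro s pos; simp
  | cons kc t ih =>
    intro s pos
    rw [List.foldl_cons, List.any_cons]
    by_cases hq : n ≤ kc.2
    · rw [if_pos hq, ih]
      simp only [hq, decide_true, Bool.true_or, if_true]
      by_cases ht : t.any (fun kc => decide (n ≤ kc.2)) = true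
      · rw [if_pos ht, pvSet_add_mem (pvMem_add_self _ _)]
      · rw [if_neg ht]
    · rw [if_neg hq, ih]
      simp only [hq, decide_false, Bool.false_or]

theorem pvCondFold_filter (q : String → Bool) :
    ∀ (l : List String) (s : PySem.Set String), l.Nodup → (∀ p ∈ l, p ∉ s) →
      l.foldl (fun s p => if q p = true then PySem.Set.add s p else s) s = s ++ l.filter q := by
  intro l
  induction l with
  | nil => intro s _ _; simp
  | cons p t ih =>
    intro s hnd hns
    rw [List.nodup_cons] at hnd
    rw [List.foldl_cons, List.filter_cons]
    by_cases hq : q p = true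
    · rw [if_pos hq, if_pos hq, pvSet_add_not_mem (hns p (by simp)),
        ih (s ++ [p]) hnd.2 (fun p' hp' => by
          rw [List.mem_append, List.mem_singleton]
          rintro (h1 | h2)
          · exact hns p' (by simp [hp']) h1
          · exact hnd.1 (h2 ▸ hp'))]
      simp
    · rw [if_neg hq, if_neg hq]
      exact ih s hnd.2 (fun p' hp' => hns p' (by simp [hp']))

theorem pvQual_eq (s : List String) (n : Int) (hne : s ≠ []) (hlen : (s.length : Int) ≤ n) :
    ((PySem.Dict.counter s).items.any (fun kc => decide (n ≤ kc.2))) =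
      ((pvTriple s).2.1 && ((pvTriple s).2.2 == n)) := by
  rw [PySem.Dict.items_counter, List.any_map]
  obtain ⟨a, t, rfl⟩ := List.exists_cons_of_ne_nil hne
  rw [Bool.eq_iff_iff]
  simp only [List.any_eq_true, Bool.and_eq_true, Function.comp, pvTriple, List.headI,
    List.drop_one, List.tail_cons, List.all_eq_true, beq_iff_eq, List.mem_cons,
    PySem.Set.mem_ofList, decide_eq_true_eq]
  constructor
  · rintro ⟨k, hk, hnk⟩
    have hcle : (((a :: t).count k : Nat) : Int) ≤ (((a :: t).length : Nat) : Int) := by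
      exact_mod_cast List.count_le_length
    have hceq : (a :: t).count k = (a :: t).length := by
      exact_mod_cast le_antisymm hcle (le_trans hlen hnk)
    have hall := List.count_eq_length.mp hceq
    have hka : k = a := hall a (by simp)
    refine ⟨fun b hb => (hall b (by simp [hb])).symm.trans hka, ?_⟩
    exact le_antisymm hlen (le_trans hnk hcle)
  · rintro ⟨hall, hlen'⟩
    refine ⟨a, Or.inl rfl, ?_⟩
    have hceq : (a :: t).count a = (a :: t).length :=
      List.count_eq_length.mpr (fun b hb => by
        rcases List.mem_cons.mp hb with h | h
        · exact h.symm
        · exact (hall b h).symm)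
    rw [hceq, ← hlen']

theorem pvInner_nil (refL : List (String × List (String × String))) (c : String)
    (h : ∀ rc ∈ refL, rc.1 ≠ c) :
    refL.flatMap (fun rc => if rc.1 = c then rc.2 else []) = [] := by
  induction refL with
  | nil => rfl
  | cons rc t ih =>
    rw [List.flatMap_cons, if_neg (h rc (by simp)), List.nil_append]
    exact ih (fun r hr => h r (by simp [hr]))

theorem pvStrain_le (refL : List (String × List (String × String))) (c p : String)
    (h1 : (refL.map (·.1)).Nodup) (h2 : ∀ rc ∈ refL, (rc.2.map (·.1)).Nodup) :
    (refL.flatMap (fun rc => if rc.1 = c then rc.2 else [])).countP (fun e => e.1 == p) ≤ 1 := by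
  induction refL with
  | nil => simp
  | cons rc rt ih =>
    rw [List.flatMap_cons, List.countP_append]
    rw [List.map_cons, List.nodup_cons] at h1
    by_cases hc : rc.1 = c
    · rw [if_pos hc]
      have hrt : rt.flatMap (fun rc => if rc.1 = c then rc.2 else []) = [] :=
        pvInner_nil rt c (fun rc' hrc' heq =>
          h1.1 ((hc.trans heq.symm) ▸ List.mem_map_of_mem hrc'))
      rw [hrt]
      simp only [List.countP_nil, Nat.add_zero]
      have hcnt : rc.2.countP (fun e => e.1 == p) = (rc.2.map (·.1)).count p := by
        rw [List.count_eq_countP, List.countP_map]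
        rfl
      rw [hcnt]
      exact List.nodup_iff_count_le_one.mp (h2 rc (by simp)) p
    · rw [if_neg hc]
      simp only [List.countP_nil, Nat.zero_add]
      exact ih h1.2 (fun rc' h' => h2 rc' (by simp [h']))

theorem pvSeqs_len_le (strains : List (String × List (String × List (String × String))))
    (c p : String)
    (hnd : ∀ st ∈ strains, (st.2.map (·.1)).Nodup ∧ ∀ rc ∈ st.2, (rc.2.map (·.1)).Nodup) :
    (pvSeqs p (pvE c strains)).length ≤ strains.length := by
  have hL : ∀ L : List (String × String), (pvSeqs p L).length = L.countP (fun e => e.1 == p) := by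
    intro L; simp [pvSeqs, List.countP_eq_length_filter]
  rw [hL]
  induction strains with
  | nil => simp [pvE]
  | cons st t ih =>
    unfold pvE
    rw [List.flatMap_cons, List.countP_append]
    have h1 := pvStrain_le st.2 c p (hnd st (by simp)).1 (fun rc hrc => (hnd st (by simp)).2 rc hrc)
    have h2 := ih (fun st' hst' => hnd st' (by simp [hst']))
    unfold pvE at h2
    calc (st.2.flatMap (fun rc => if rc.1 = c then rc.2 else [])).countP (fun e => e.1 == p) +
          (t.flatMap (fun st => st.2.flatMap (fun rc => if rc.1 = c then rc.2 else []))).countP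
            (fun e => e.1 == p) ≤ 1 + t.length := Nat.add_le_add h1 h2
    _ = (st :: t).length := by simp [Nat.add_comm]

theorem pvGroup_eq (strains : List (String × List (String × List (String × String))))
    (hnd : ∀ st ∈ strains, (st.2.map (·.1)).Nodup ∧ ∀ rc ∈ st.2, (rc.2.map (·.1)).Nodup) :
    (pvA_identGroup (strains.length : Int) (pvA_group strains)).items = pvB_groupIdent strains := by
  have hndK : (PySem.Set.ofList (strains.flatMap (fun st => st.2.map (·.1)))).Nodup :=
    PySem.Set.nodup_ofList _
  have hkeysA : (pvA_group strains).keys = PySem.Set.ofList (strains.flatMap (fun st => st.2.map (·.1))) := by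
    unfold pvA_group
    rw [pvA_group_keys, PySem.Dict.keys_empty, PySem.Set.update_nil_left]
  have hgA : ∀ c, (pvA_group strains).getD c PySem.Dict.empty = pvFoldA (pvE c strains) PySem.Dict.empty := by
    intro c; unfold pvA_group; rw [pvA_group_getD, PySem.Dict.getD_empty]
  have hitemsA : (pvA_group strains).items =
      (PySem.Set.ofList (strains.flatMap (fun st => st.2.map (·.1)))).map
        (fun c => (c, pvFoldA (pvE c strains) PySem.Dict.empty)) := by
    rw [PySem.Dict.items_eq_map_keys _ (by rw [hkeysA]; exact hndK) PySem.Dict.empty, hkeysA]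
    exact List.map_congr_left (fun c _ => by rw [hgA])
  have hkeysB : (pvB_summary strains).keys = PySem.Set.ofList (strains.flatMap (fun st => st.2.map (·.1))) := by
    unfold pvB_summary
    rw [pvB_group_keys, PySem.Dict.keys_empty, PySem.Set.update_nil_left]
  have hgB : ∀ c, (pvB_summary strains).getD c PySem.Dict.empty = pvFoldB (pvE c strains) PySem.Dict.empty := by
    intro c; unfold pvB_summary; rw [pvB_group_getD, PySem.Dict.getD_empty]
  have hitemsB : (pvB_summary strains).items =
      (PySem.Set.ofList (strains.flatMap (fun st => st.2.map (·.1)))).map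
        (fun c => (c, pvFoldB (pvE c strains) PySem.Dict.empty)) := by
    rw [PySem.Dict.items_eq_map_keys _ (by rw [hkeysB]; exact hndK) PySem.Dict.empty, hkeysB]
    exact List.map_congr_left (fun c _ => by rw [hgB])
  have hSne : ∀ (L : List (String × String)) p, p ∈ PySem.Set.ofList (L.map (·.1)) → pvSeqs p L ≠ [] := by
    intro L p hp hnil
    obtain ⟨e, he, rfl⟩ := List.mem_map.mp ((PySem.Set.mem_ofList _ _).mp hp)
    have hmem : e ∈ L.filter (fun x => x.1 == e.1) := List.mem_filter.mpr ⟨he, by simp⟩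
    rw [pvSeqs, List.map_eq_nil_iff] at hnil
    rw [hnil] at hmem
    exact absurd hmem (List.not_mem_nil)
  have hposA : ∀ c, (pvFoldA (pvE c strains) PySem.Dict.empty).items =
      (PySem.Set.ofList ((pvE c strains).map (·.1))).map
        (fun p => (p, PySem.Dict.counter (pvSeqs p (pvE c strains)))) := by
    intro c
    have hk : (pvFoldA (pvE c strains) PySem.Dict.empty).keys =
        PySem.Set.ofList ((pvE c strains).map (·.1)) := by
      rw [pvFoldA_keys, PySem.Dict.keys_empty, PySem.Set.update_nil_left]
    rw [PySem.Dict.items_eq_map_keys _ (by rw [hk]; exact PySem.Set.nodup_ofList _) PySem.Dict.empty, hk]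
    apply List.map_congr_left
    intro p hp
    rw [PySem.Dict.getD_eq_get?_getD, pvFoldA_get?, if_neg (hSne _ p hp), Option.getD_some]
  have hposB : ∀ c, (pvFoldB (pvE c strains) PySem.Dict.empty).items =
      (PySem.Set.ofList ((pvE c strains).map (·.1))).map
        (fun p => (p, pvTriple (pvSeqs p (pvE c strains)))) := by
    intro c
    have hk : (pvFoldB (pvE c strains) PySem.Dict.empty).keys =
        PySem.Set.ofList ((pvE c strains).map (·.1)) := by
      rw [pvFoldB_keys, PySem.Dict.keys_empty, PySem.Set.update_nil_left]
    rw [PySem.Dict.items_eq_map_keys _ (by rw [hk]; exact PySem.Set.nodup_ofList _)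
        (PySem.Dict.empty.getD "" ("", true, 0) |> fun _ => ("", true, (0 : Int))), hk]
    apply List.map_congr_left
    intro p hp
    rw [PySem.Dict.getD_eq_get?_getD, pvFoldB_get?, if_neg (hSne _ p hp), Option.getD_some]
  have hidentA : (pvA_identGroup (strains.length : Int) (pvA_group strains)).items =
      (pvA_group strains).items.map (fun cp => (cp.1,
        cp.2.items.foldl (fun s pe => pvA_addPos (strains.length : Int) s pe.1 pe.2)
          PySem.Set.empty)) := by
    unfold pvA_identGroup
    rw [pvIdentFold_items (fun cp s => cp.2.items.foldl
        (fun s pe => pvA_addPos (strains.length : Int) s pe.1 pe.2) s)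
      (pvA_group strains).items PySem.Dict.empty
      (fun a _ => PySem.Dict.contains_empty _)
      (by show ((pvA_group strains).items.map (·.1)).Nodup
          have hkk : (pvA_group strains).items.map (·.1) = (pvA_group strains).keys := rfl
          rw [hkk, hkeysA]; exact hndK)]
    rfl
  rw [hidentA, hitemsA, List.map_map]
  unfold pvB_groupIdent
  rw [hitemsB, List.map_map]
  apply List.map_congr_left
  intro c hcK
  simp only [Function.comp_def]
  congr 1
  -- left: the phase-2 set for chromosome c; right: B's filtered positions
  rw [hposA c, hposB c, List.foldl_map, List.filter_map, List.map_map]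
  have hfold := PySem.List.foldl_congr_mem
      (PySem.Set.ofList (List.map (fun x => x.1) (pvE c strains)))
      (fun x y => pvA_addPos ((strains.length : Int)) x
        (y, PySem.Dict.counter (pvSeqs y (pvE c strains))).1
        (y, PySem.Dict.counter (pvSeqs y (pvE c strains))).2)
      (fun s p => if ((PySem.Dict.counter (pvSeqs p (pvE c strains))).items.any
          (fun kc => decide ((strains.length : Int) ≤ kc.2))) = true
        then PySem.Set.add s p else s)
      PySem.Set.empty
      (fun acc x _ => pvAddPos_any (strains.length : Int)
        (PySem.Dict.counter (pvSeqs x (pvE c strains))).items acc x)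
  rw [hfold, pvCondFold_filter _ _ _ (PySem.Set.nodup_ofList _) (by simp),
    show (PySem.Set.empty : PySem.Set String) = ([] : List String) from rfl, List.nil_append]
  simp only [Function.comp_def]
  rw [show (List.map (fun x => (x, pvTriple (pvSeqs x (pvE c strains))).1) = fun
      (l : List String) => l) from funext (fun l => by simp)]
  apply List.filter_congr
  intro p hp
  exact pvQual_eq (pvSeqs p (pvE c strains)) (strains.length : Int)
    (hSne _ p hp)
    (by exact_mod_cast pvSeqs_len_le strains c p hnd)

theorem pvItems_empty {ν : Type} : (PySem.Dict.empty : PySem.Dict String ν).items = [] := rfl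

theorem pvPairFold_items {ν1 ν2 β : Type} (k : β → String) (v1 : β → ν1) (v2 : β → ν2) :
    ∀ (l : List β) (a : PySem.Dict String ν1 × PySem.Dict String ν2),
      (∀ x ∈ l, a.1.contains (k x) = false ∧ a.2.contains (k x) = false) → ((l.map k).Nodup) →
      (l.foldl (fun p x => (p.1.insert (k x) (v1 x), p.2.insert (k x) (v2 x))) a).1.items =
          a.1.items ++ l.map (fun x => (k x, v1 x)) ∧
        (l.foldl (fun p x => (p.1.insert (k x) (v1 x), p.2.insert (k x) (v2 x))) a).2.items =
          a.2.items ++ l.map (fun x => (k x, v2 x)) := by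
  intro l
  induction l with
  | nil => intro a _ _; simp
  | cons x t ih =>
    intro a hf hnd
    rw [List.map_cons, List.nodup_cons] at hnd
    obtain ⟨hf1, hf2⟩ := hf x (by simp)
    have hfresh : ∀ y ∈ t,
        (a.1.insert (k x) (v1 x)).contains (k y) = false ∧
        (a.2.insert (k x) (v2 x)).contains (k y) = false := by
      intro y hy
      have hne : (k y == k x) = false := by
        simp only [beq_eq_false_iff_ne, ne_eq]
        intro heq
        exact hnd.1 (heq ▸ List.mem_map_of_mem hy)
      constructor <;> rw [PySem.Dict.contains_insert, hne, Bool.false_or]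
      · exact (hf y (by simp [hy])).1
      · exact (hf y (by simp [hy])).2
    obtain ⟨i1, i2⟩ := ih (a.1.insert (k x) (v1 x), a.2.insert (k x) (v2 x)) hfresh hnd.2
    constructor
    · rw [List.foldl_cons]
      simp only at i1 ⊢
      rw [i1, PySem.Dict.items_insert_of_not_contains _ _ hf1]
      simp
    · rw [List.foldl_cons]
      simp only at i2 ⊢
      rw [i2, PySem.Dict.items_insert_of_not_contains _ _ hf2]
      simp

-- proof-only names for the two nested pair folds and the phase-2 row of port A
def pvInnerPair (gd : List (String × List (String × List (String × List (String × String))))) :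
    PySem.Dict String (PySem.Dict String (PySem.Dict String (PySem.Dict String Int))) ×
      PySem.Dict String Int :=
  gd.foldl (fun p gr => (p.1.insert gr.1 (pvA_group gr.2), p.2.insert gr.1 ((gr.2.length : Int))))
    (PySem.Dict.empty, PySem.Dict.empty)

def pvPhase1 (g : List (String × List (String × List (String × List (String × List (String × String)))))) :
    PySem.Dict String (PySem.Dict String (PySem.Dict String (PySem.Dict String (PySem.Dict String Int)))) ×
      PySem.Dict String (PySem.Dict String Int) :=
  g.foldl (fun st sp => (st.1.insert sp.1 (pvInnerPair sp.2).1, st.2.insert sp.1 (pvInnerPair sp.2).2))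
    (PySem.Dict.empty, PySem.Dict.empty)

def pvRow (sgsd : PySem.Dict String (PySem.Dict String Int))
    (spe : String × PySem.Dict String (PySem.Dict String (PySem.Dict String (PySem.Dict String Int)))) :
    PySem.Dict String (PySem.Dict String (PySem.Set String)) :=
  spe.2.items.foldl (fun out2 ge =>
    out2.insert ge.1 (pvA_identGroup ((sgsd.getD spe.1 PySem.Dict.empty).getD ge.1 0) ge.2))
    PySem.Dict.empty

-- ===== VERDICT (by name: the statement is the Claim_ definition above) =====
theorem find_identical_calls_spec : Claim_equal_find_identical_calls := by
  intro g _hDom hPre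
  obtain ⟨hnd0, hPre2⟩ := hPre
  unfold Spec_find_identical_calls
  have hA : find_identical_calls g =
      ((pvPhase1 g).1.items.foldl
          (fun out spe => out.insert spe.1 (pvRow (pvPhase1 g).2 spe)) PySem.Dict.empty).items.map
        (fun spe => (spe.1, spe.2.items.map (fun ge => (ge.1, ge.2.items)))) := rfl
  have hpair := pvPairFold_items (fun sp => sp.1) (fun sp => (pvInnerPair sp.2).1)
    (fun sp => (pvInnerPair sp.2).2) g (PySem.Dict.empty, PySem.Dict.empty)
    (fun x _ => ⟨PySem.Dict.contains_empty _, PySem.Dict.contains_empty _⟩) hnd0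
  have hit1 : (pvPhase1 g).1.items = g.map (fun sp => (sp.1, (pvInnerPair sp.2).1)) := by
    unfold pvPhase1
    rw [hpair.1]
    simp [pvItems_empty]
  have hit2 : (pvPhase1 g).2.items = g.map (fun sp => (sp.1, (pvInnerPair sp.2).2)) := by
    unfold pvPhase1
    rw [hpair.2]
    simp [pvItems_empty]
  have hinner : ∀ sp ∈ g,
      (pvInnerPair sp.2).1.items = sp.2.map (fun gr => (gr.1, pvA_group gr.2)) ∧
      (pvInnerPair sp.2).2.items = sp.2.map (fun gr => (gr.1, (gr.2.length : Int))) := by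
    intro sp hsp
    have h := pvPairFold_items (fun gr => gr.1) (fun gr => pvA_group gr.2)
      (fun gr => (gr.2.length : Int)) sp.2 (PySem.Dict.empty, PySem.Dict.empty)
      (fun x _ => ⟨PySem.Dict.contains_empty _, PySem.Dict.contains_empty _⟩) (hPre2 sp hsp).1
    unfold pvInnerPair
    constructor
    · rw [h.1]; simp [pvItems_empty]
    · rw [h.2]; simp [pvItems_empty]
  have hk1 : ((pvPhase1 g).1.items.map (·.1)) = g.map (·.1) := by
    rw [hit1, List.map_map]
    rfl
  have hph2 : ((pvPhase1 g).1.items.foldl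
      (fun out spe => out.insert spe.1 (pvRow (pvPhase1 g).2 spe)) PySem.Dict.empty).items =
      (pvPhase1 g).1.items.map (fun spe => (spe.1, pvRow (pvPhase1 g).2 spe)) := by
    rw [PySem.Dict.items_foldl_insert_fresh ((pvPhase1 g).1.items) (fun spe => spe.1)
      (fun spe => pvRow (pvPhase1 g).2 spe) PySem.Dict.empty
      (fun a _ => PySem.Dict.contains_empty _) (by rw [hk1]; exact hnd0)]
    simp [pvItems_empty]
  rw [hA, hph2, hit1, List.map_map, List.map_map]
  unfold find_identical_calls_alt
  apply List.map_congr_left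
  intro sp hsp
  simp only [Function.comp_def]
  congr 1
  unfold pvRow
  rw [(hinner sp hsp).1, List.foldl_map]
  have hsg : (pvPhase1 g).2.getD sp.1 PySem.Dict.empty = (pvInnerPair sp.2).2 := by
    have hnd2 : (pvPhase1 g).2.keys.Nodup := by
      show ((pvPhase1 g).2.items.map (·.1)).Nodup
      rw [hit2, List.map_map]
      exact hnd0
    rw [PySem.Dict.getD_eq_get?_getD,
      PySem.Dict.get?_of_mem_items _ (by rw [hit2]; exact List.mem_map_of_mem hsp) hnd2]
    rfl
  have hlen : ∀ gr ∈ sp.2, ((pvInnerPair sp.2).2.getD gr.1 0) = (gr.2.length : Int) := by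
    intro gr hgr
    have hnd3 : (pvInnerPair sp.2).2.keys.Nodup := by
      show ((pvInnerPair sp.2).2.items.map (·.1)).Nodup
      rw [(hinner sp hsp).2, List.map_map]
      exact (hPre2 sp hsp).1
    rw [PySem.Dict.getD_eq_get?_getD,
      PySem.Dict.get?_of_mem_items _ (by rw [(hinner sp hsp).2]; exact List.mem_map_of_mem hgr) hnd3]
    rfl
  rw [PySem.List.foldl_congr_mem sp.2 _
      (fun out2 gr => out2.insert gr.1 (pvA_identGroup ((gr.2.length : Int)) (pvA_group gr.2)))
      PySem.Dict.empty
      (fun acc gr hgr => by rw [hsg, hlen gr hgr])]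
  rw [PySem.Dict.items_foldl_insert_fresh sp.2 (fun gr => gr.1)
      (fun gr => pvA_identGroup ((gr.2.length : Int)) (pvA_group gr.2)) PySem.Dict.empty
      (fun a _ => PySem.Dict.contains_empty _) (hPre2 sp hsp).1]
  simp only [pvItems_empty, List.nil_append]
  rw [List.map_map]
  apply List.map_congr_left
  intro gr hgr
  simp only [Function.comp_def]
  congr 1
  exact pvGroup_eq gr.2 (fun st hst => ((hPre2 sp hsp).2 gr hgr).2 st hst)
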